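-- pv_equiv track=rewrite | github.com/VUzan-bio/RPA-CRISPR-model | scripts/design_mtb_multiplex.py | _match_region
-- ===== SOURCE A (Python) =====
-- from typing import Dict, List, Optional
--
-- def _match_region(gene: str, regions: Dict[str, str]) -> Optional[str]:
--     if gene in regions:
--         return gene
--     gene_lower = gene.lower()
--     candidates = [name for name in regions if gene_lower == name.lower()]
--     if not candidates:
--         candidates = [name for name in regions if gene_lower in name.lower()]
--     if not candidates:
--         return None
--     candidates.sort(key=len)
--     return candidates[0]
-- ===== SOURCE B (Python) =====
-- def _match_region(gene, regions):
--     if gene in regions: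
--         return gene
--     gene_lower = gene.lower()
--     best_exact = None
--     best_sub = None
--     for name in regions:
--         name_lower = name.lower()
--         if name_lower == gene_lower:
--             if best_exact is None or len(name) < len(best_exact):
--                 best_exact = name
--         elif gene_lower in name_lower:
--             if best_sub is None or len(name) < len(best_sub):
--                 best_sub = name
--     return best_exact if best_exact is not None else best_sub
-- ===== Notes on version B (the rewrite author's own statement) =====
-- stated objective: alternative
-- what changed: B replaces A's two filter passes plus a stable sort of the candidate list by a single pass over the names maintaining two running shortest candidates (best exact-lowercase match and best substring match), updated with strict < so the first minimal-length name still wins; no candidate list and no sort are built.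
import Mathlib
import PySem

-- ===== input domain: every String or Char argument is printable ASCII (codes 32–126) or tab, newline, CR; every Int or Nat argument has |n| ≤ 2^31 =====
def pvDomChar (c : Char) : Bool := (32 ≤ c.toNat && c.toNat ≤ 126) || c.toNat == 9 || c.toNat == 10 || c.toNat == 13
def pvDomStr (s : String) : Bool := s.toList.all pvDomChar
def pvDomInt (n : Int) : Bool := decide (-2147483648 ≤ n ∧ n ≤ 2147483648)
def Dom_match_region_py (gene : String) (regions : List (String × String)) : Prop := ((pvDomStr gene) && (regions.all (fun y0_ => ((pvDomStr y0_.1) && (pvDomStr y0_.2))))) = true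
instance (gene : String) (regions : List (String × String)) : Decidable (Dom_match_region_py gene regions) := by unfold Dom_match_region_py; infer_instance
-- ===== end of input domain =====

-- B makes one pass keeping two running shortest candidates instead of building two filtered lists and sorting the candidate list; return values proved equal (A sorts only a temporary list, no observable mutation).

-- ===== PORT A =====
def match_region_py (gene : String) (regions : List (String × String)) : Option String :=
  let keys := regions.map Prod.fst
  if keys.contains gene then some gene
  else
    let geneLower := PySem.Str.lower gene
    let candidates := keys.filter (fun name => geneLower == PySem.Str.lower name)
    let candidates2 := if candidates = [] then keys.filter (fun name => PySem.Str.isIn geneLower (PySem.Str.lower name)) else candidates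
    if candidates2 = [] then none
    else (PySem.List.sorted candidates2 (fun s => PySem.Str.len s) false).head?

-- ===== PORT B =====
-- running shortest candidate: replace only when strictly shorter (first minimal-length name wins)
def pvUpd (best : Option String) (name : String) : Option String :=
  match best with
  | none => some name
  | some b => if PySem.Str.len name < PySem.Str.len b then some name else some b

def match_region_py_alt (gene : String) (regions : List (String × String)) : Option String :=
  if (regions.map Prod.fst).contains gene then some gene
  else
    let geneLower := PySem.Str.lower gene
    let r := regions.foldl (fun (acc : Option String × Option String) p =>
        if PySem.Str.lower p.1 == geneLower then (pvUpd acc.1 p.1, acc.2)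
        else if PySem.Str.isIn geneLower (PySem.Str.lower p.1) then (acc.1, pvUpd acc.2 p.1)
        else acc) (none, none)
    match r.1 with
    | some b => some b
    | none => r.2

-- ===== PRECONDITION & SPEC =====
def Spec_match_region_py (gene : String) (regions : List (String × String)) (out : Option String) : Prop := out = match_region_py_alt gene regions
instance (gene : String) (regions : List (String × String)) (out : Option String) : Decidable (Spec_match_region_py gene regions out) := by unfold Spec_match_region_py; infer_instance

-- ===== CLAIM (what is proved, stated in full; the proofs are below) =====
def Claim_equal_match_region_py : Prop := ∀ (gene : String) (regions : List (String × String)), Dom_match_region_py gene regions → Spec_match_region_py gene regions (match_region_py gene regions)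

-- ===== LEMMAS AND PROOFS =====

-- head of a stability-preserving insert: the shorter of head and the new element (head wins ties)
theorem head?_insertBy (x : String) (acc : List String) :
    (PySem.List.insertBy (fun a b => decide (PySem.Str.len a < PySem.Str.len b)) x acc).head? = pvUpd acc.head? x := by
  cases acc with
  | nil => simp [PySem.List.insertBy, pvUpd]
  | cons y ys =>
    simp only [PySem.List.insertBy, pvUpd]
    split_ifs <;> simp_all

theorem head?_foldl_insertBy (l acc : List String) :
    (l.foldl (fun a x => PySem.List.insertBy (fun a b => decide (PySem.Str.len a < PySem.Str.len b)) x a) acc).head?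
      = l.foldl pvUpd acc.head? := by
  induction l generalizing acc with
  | nil => rfl
  | cons x t ih => simp only [List.foldl_cons, ih, head?_insertBy]

-- head of Python's stable sort by len = single-pass first shortest element
theorem head?_sorted (l : List String) :
    (PySem.List.sorted l (fun s => PySem.Str.len s) false).head? = l.foldl pvUpd none := by
  exact head?_foldl_insertBy l []

theorem pvUpd_ne_none (b : Option String) (n : String) : pvUpd b n ≠ none := by
  cases b with
  | none => simp [pvUpd]
  | some m => simp only [pvUpd]; split_ifs <;> simp

theorem foldl_pvUpd_eq_none (l : List String) (b : Option String) :
    l.foldl pvUpd b = none ↔ l = [] ∧ b = none := by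
  induction l generalizing b with
  | nil => simp
  | cons n t ih =>
    rw [List.foldl_cons, ih]
    simp [pvUpd_ne_none]

-- B's single loop computes the running shortest of A's two filtered candidate lists
theorem foldl_step_eq (gl : String) (rs : List (String × String)) (be bs : Option String) :
    rs.foldl (fun (acc : Option String × Option String) p =>
        if PySem.Str.lower p.1 == gl then (pvUpd acc.1 p.1, acc.2)
        else if PySem.Str.isIn gl (PySem.Str.lower p.1) then (acc.1, pvUpd acc.2 p.1)
        else acc) (be, bs)
    = (((rs.map Prod.fst).filter (fun name => gl == PySem.Str.lower name)).foldl pvUpd be,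
       ((rs.map Prod.fst).filter (fun name => !(gl == PySem.Str.lower name) && PySem.Str.isIn gl (PySem.Str.lower name))).foldl pvUpd bs) := by
  induction rs generalizing be bs with
  | nil => rfl
  | cons p t ih =>
    simp only [List.foldl_cons, List.map_cons, List.filter_cons]
    by_cases h : (PySem.Str.lower p.1 == gl) = true
    · have h' : (gl == PySem.Str.lower p.1) = true := by
        rw [beq_iff_eq] at h ⊢; exact h.symm
      rw [if_pos h, ih, h']
      simp
    · have h' : (gl == PySem.Str.lower p.1) = false := by
        rw [beq_eq_false_iff_ne]
        intro e; exact h (by rw [beq_iff_eq]; exact e.symm)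
      rw [if_neg h, h']
      by_cases h2 : PySem.Str.isIn gl (PySem.Str.lower p.1) = true
      · have h2c : PySem.Chars.isIn gl.toList (PySem.Chars.lower p.1.toList) = true := by
          simpa using h2
        rw [if_pos h2, ih]
        simp [h2c]
      · have h2' : PySem.Str.isIn gl (PySem.Str.lower p.1) = false := by
          rw [Bool.eq_false_iff]; exact fun e => h2 e
        have h2c : PySem.Chars.isIn gl.toList (PySem.Chars.lower p.1.toList) = false := by
          simpa using h2'
        rw [if_neg h2, ih]
        simp [h2c]

-- ===== VERDICT (by name: the statement is the Claim_ definition above) =====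
theorem match_region_py_spec : Claim_equal_match_region_py := by
  intro gene regions _
  unfold Spec_match_region_py match_region_py match_region_py_alt
  simp only []
  by_cases hc : (regions.map Prod.fst).contains gene = true
  · rw [if_pos hc, if_pos hc]
  · rw [if_neg hc, if_neg hc, foldl_step_eq]
    by_cases hE : (regions.map Prod.fst).filter (fun name => PySem.Str.lower gene == PySem.Str.lower name) = []
    · rw [if_pos hE, hE]
      simp only [List.foldl_nil]
      have hnone : ∀ n ∈ regions.map Prod.fst, (PySem.Str.lower gene == PySem.Str.lower n) = false := by
        intro n hn
        have := List.filter_eq_nil_iff.mp hE n hn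
        simpa using this
      have hfe : (regions.map Prod.fst).filter
            (fun name => !(PySem.Str.lower gene == PySem.Str.lower name) && PySem.Str.isIn (PySem.Str.lower gene) (PySem.Str.lower name))
          = (regions.map Prod.fst).filter (fun name => PySem.Str.isIn (PySem.Str.lower gene) (PySem.Str.lower name)) := by
        apply List.filter_congr
        intro n hn
        rw [hnone n hn]
        simp
      rw [hfe]
      by_cases hS : (regions.map Prod.fst).filter (fun name => PySem.Str.isIn (PySem.Str.lower gene) (PySem.Str.lower name)) = []
      · rw [if_pos hS, hS, List.foldl_nil]
      · rw [if_neg hS, head?_sorted]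
    · rw [if_neg hE, if_neg hE, head?_sorted]
      have hne : ((regions.map Prod.fst).filter (fun name => PySem.Str.lower gene == PySem.Str.lower name)).foldl pvUpd none ≠ none := by
        rw [Ne, foldl_pvUpd_eq_none]
        tauto
      obtain ⟨b, hb⟩ := Option.ne_none_iff_exists'.mp hne
      rw [hb]
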